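-- pv_equiv track=rewrite | github.com/pc5401/my_BOJ | 백준/Silver/15233. Final Score/Final Score.py | solve
-- ===== SOURCE A (Python) =====
-- def solve(a: int, b: int, g: int, ta: list[str], tb: list[str], scr: list[str]) -> str:
--     setA = set(ta)
--     setB = set(tb)
--     cntA = cntB = 0
--     for s in scr:
--         if s in setA:
--             cntA += 1
--         elif s in setB:
--             cntB += 1
--     if cntA > cntB:
--         return "A"
--     elif cntB > cntA:
--         return "B"
--     else:
--         return "TIE"
-- ===== SOURCE B (Python) =====
-- def solve(a: int, b: int, g: int, ta: list[str], tb: list[str], scr: list[str]) -> str: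
--     cnt = {}
--     for s in scr:
--         cnt[s] = cnt.get(s, 0) + 1
--     setA = set(ta)
--     onlyB = set(tb) - setA
--     cntA = sum(cnt.get(x, 0) for x in setA)
--     cntB = sum(cnt.get(x, 0) for x in onlyB)
--     if cntA > cntB:
--         return "A"
--     if cntB > cntA:
--         return "B"
--     return "TIE"
-- ===== Notes on version B (the rewrite author's own statement) =====
-- stated objective: alternative
-- what changed: Instead of scanning the scorer list with membership tests against both team sets, B builds a frequency table of the scorers once and then sums the frequencies over the roster set of A and over set(tb)-set(ta), so the accumulation loop runs over team rosters with counter lookups rather than over scorers with set-membership branches.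
import Mathlib
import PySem

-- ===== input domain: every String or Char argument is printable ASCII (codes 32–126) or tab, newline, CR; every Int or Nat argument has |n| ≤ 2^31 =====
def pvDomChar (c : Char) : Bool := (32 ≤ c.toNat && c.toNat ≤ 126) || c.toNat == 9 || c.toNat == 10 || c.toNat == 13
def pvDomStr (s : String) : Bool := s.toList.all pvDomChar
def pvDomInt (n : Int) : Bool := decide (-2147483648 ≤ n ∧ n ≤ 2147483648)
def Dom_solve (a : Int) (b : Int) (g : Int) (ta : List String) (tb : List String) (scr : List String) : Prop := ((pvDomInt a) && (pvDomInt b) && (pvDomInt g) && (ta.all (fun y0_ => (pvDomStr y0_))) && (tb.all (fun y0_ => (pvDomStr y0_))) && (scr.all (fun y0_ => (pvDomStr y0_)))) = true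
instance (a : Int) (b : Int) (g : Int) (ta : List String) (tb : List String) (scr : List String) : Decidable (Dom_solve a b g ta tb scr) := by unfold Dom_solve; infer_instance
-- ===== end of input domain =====

-- B replaces A's single scan of the scorers (with set-membership branches) by a frequency
-- table of the scorers summed over set(ta) and set(tb)-set(ta); objective: alternative.

-- ===== PORT A =====
def solve (a : Int) (b : Int) (g : Int) (ta : List String) (tb : List String) (scr : List String) : String :=
  let setA : PySem.Set String := PySem.Set.ofList ta
  let setB : PySem.Set String := PySem.Set.ofList tb
  let p : Int × Int := scr.foldl (fun (p : Int × Int) s =>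
      if PySem.Set.contains setA s then (p.1 + 1, p.2)
      else if PySem.Set.contains setB s then (p.1, p.2 + 1)
      else p) (0, 0)
  if p.1 > p.2 then "A" else if p.2 > p.1 then "B" else "TIE"

-- ===== PORT B =====
def solve_alt (a : Int) (b : Int) (g : Int) (ta : List String) (tb : List String) (scr : List String) : String :=
  let cnt : PySem.Dict String Int :=
    scr.foldl (fun (d : PySem.Dict String Int) s => d.insert s (d.getD s 0 + 1)) PySem.Dict.empty
  let setA : PySem.Set String := PySem.Set.ofList ta
  let onlyB : PySem.Set String := PySem.Set.diff (PySem.Set.ofList tb) setA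
  let cntA : Int := (setA.map (fun x => cnt.getD x 0)).sum
  let cntB : Int := (onlyB.map (fun x => cnt.getD x 0)).sum
  if cntA > cntB then "A" else if cntB > cntA then "B" else "TIE"

-- ===== PRECONDITION & SPEC =====
def Spec_solve (a : Int) (b : Int) (g : Int) (ta : List String) (tb : List String) (scr : List String) (out : String) : Prop := out = solve_alt a b g ta tb scr
instance (a : Int) (b : Int) (g : Int) (ta : List String) (tb : List String) (scr : List String) (out : String) : Decidable (Spec_solve a b g ta tb scr out) := by unfold Spec_solve; infer_instance

-- ===== CLAIM (what is proved, stated in full; the proofs are below) =====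
def Claim_equal_solve : Prop := ∀ (a : Int) (b : Int) (g : Int) (ta : List String) (tb : List String) (scr : List String), Dom_solve a b g ta tb scr → Spec_solve a b g ta tb scr (solve a b g ta tb scr)

-- ===== LEMMAS AND PROOFS =====

-- Sum of a 0/1 indicator over a duplicate-free list is membership.
theorem pv_sum_ind (S : List String) (s : String) (hS : S.Nodup) :
    (S.map fun x => if x == s then (1 : Int) else 0).sum = if s ∈ S then 1 else 0 := by
  induction S with
  | nil => simp
  | cons x S ih =>
    rcases List.nodup_cons.mp hS with ⟨hx, hS'⟩
    rw [List.map_cons, List.sum_cons, ih hS']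
    by_cases h : x = s
    · subst h
      simp [hx]
    · simp [h, Ne.symm h]

-- Summing per-element occurrence counts over a duplicate-free list S equals counting
-- the scorers that lie in S.
theorem pv_sum_count (S : List String) (hS : S.Nodup) (scr : List String) :
    (S.map fun x => ((scr.count x : Nat) : Int)).sum
      = ((scr.countP fun t => decide (t ∈ S)) : Int) := by
  induction scr with
  | nil => simp
  | cons s t ih =>
    have hsplit : (S.map fun x => ((( s :: t).count x : Nat) : Int)).sum
        = (S.map fun x => ((t.count x : Nat) : Int)).sum
          + (S.map fun x => if x == s then (1 : Int) else 0).sum := by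
      rw [← List.sum_map_add]
      apply congrArg
      apply List.map_congr_left
      intro x _
      rw [List.count_cons]
      by_cases h : x = s
      · simp [h]
      · simp [h, Ne.symm h]
    rw [hsplit, ih, pv_sum_ind S s hS, List.countP_cons]
    by_cases h : s ∈ S <;> simp [h]

theorem solve_eq_alt (a : Int) (b : Int) (g : Int) (ta : List String) (tb : List String) (scr : List String) :
    solve a b g ta tb scr = solve_alt a b g ta tb scr := by
  unfold solve solve_alt
  simp only [PySem.Dict.foldl_insert_getD_add_one_eq_counter, PySem.Dict.getD_counter]
  rw [pv_sum_count _ (PySem.Set.nodup_ofList ta) scr,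
      pv_sum_count _ (PySem.Set.nodup_diff (PySem.Set.ofList tb) (PySem.Set.ofList ta) (PySem.Set.nodup_ofList tb)) scr]
  have hfold : scr.foldl (fun (p : Int × Int) s =>
      if PySem.Set.contains (PySem.Set.ofList ta) s then (p.1 + 1, p.2)
      else if PySem.Set.contains (PySem.Set.ofList tb) s then (p.1, p.2 + 1)
      else p) (0, 0)
      = (scr.foldl (fun (acc : Int) s =>
            if PySem.Set.contains (PySem.Set.ofList ta) s then acc + 1 else acc) 0,
         scr.foldl (fun (acc : Int) s =>
            if !PySem.Set.contains (PySem.Set.ofList ta) s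
               && PySem.Set.contains (PySem.Set.ofList tb) s then acc + 1 else acc) 0) := by
    rw [← PySem.List.foldl_prod_mk]
    apply PySem.List.foldl_congr_mem
    intro acc x _
    by_cases h1 : x ∈ ta <;> by_cases h2 : x ∈ tb
      <;> simp [h1, h2, PySem.Set.mem_ofList]
  rw [hfold]
  rw [PySem.List.foldl_if_add_one, PySem.List.foldl_if_add_one]
  have hA : (scr.countP fun s => PySem.Set.contains (PySem.Set.ofList ta) s)
      = scr.countP fun t => decide (t ∈ PySem.Set.ofList ta) := by
    apply List.countP_congr
    intro x _
    by_cases h : x ∈ ta <;> simp [h, PySem.Set.mem_ofList]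
  have hB : (scr.countP fun s => !PySem.Set.contains (PySem.Set.ofList ta) s
        && PySem.Set.contains (PySem.Set.ofList tb) s)
      = scr.countP fun t => decide (t ∈ PySem.Set.diff (PySem.Set.ofList tb) (PySem.Set.ofList ta)) := by
    apply List.countP_congr
    intro x _
    by_cases h1 : x ∈ ta <;> by_cases h2 : x ∈ tb <;>
      simp [h1, h2, PySem.Set.mem_ofList, PySem.Set.mem_diff]
  simp only [hA, hB, zero_add]

-- ===== VERDICT (by name: the statement is the Claim_ definition above) =====
theorem solve_spec : Claim_equal_solve := by
  intro a b g ta tb scr _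
  unfold Spec_solve
  exact solve_eq_alt a b g ta tb scr
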